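-- pv_equiv track=rewrite | github.com/ParkinPot/01076109-Object-Oriented-Data-Structures-OOD- | Chapter9/Chapter9_4.py | vowel_info
-- ===== SOURCE A (Python) =====
-- def vowel_info(word):
--     vowels = "aeiou"
--     priority = {"a":5, "e":4, "i":3, "o":2, "u":1}
--     count = 0
--     max_priority = 0
--     for ch in word:
--         if ch in vowels:
--             count += 1
--             if priority[ch] > max_priority:
--                 max_priority = priority[ch]
--     return count, max_priority
-- ===== SOURCE B (Python) =====
-- def vowel_info(word):
--     priority = {"a": 5, "e": 4, "i": 3, "o": 2, "u": 1}
--     freq = {}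
--     for ch in word:
--         freq[ch] = freq.get(ch, 0) + 1
--     count = sum(freq.get(v, 0) for v in priority)
--     max_priority = 0
--     for v in priority:
--         if v in freq:
--             max_priority = priority[v]
--             break
--     return count, max_priority
-- ===== Notes on version B (the rewrite author's own statement) =====
-- stated objective: alternative
-- what changed: B builds a character-frequency map in one pass and then derives the vowel count by summing the five vowel frequencies and the max priority by scanning the vowels in descending priority order with an early break, instead of A's single character loop that tracks count and running max together.
import Mathlib
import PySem

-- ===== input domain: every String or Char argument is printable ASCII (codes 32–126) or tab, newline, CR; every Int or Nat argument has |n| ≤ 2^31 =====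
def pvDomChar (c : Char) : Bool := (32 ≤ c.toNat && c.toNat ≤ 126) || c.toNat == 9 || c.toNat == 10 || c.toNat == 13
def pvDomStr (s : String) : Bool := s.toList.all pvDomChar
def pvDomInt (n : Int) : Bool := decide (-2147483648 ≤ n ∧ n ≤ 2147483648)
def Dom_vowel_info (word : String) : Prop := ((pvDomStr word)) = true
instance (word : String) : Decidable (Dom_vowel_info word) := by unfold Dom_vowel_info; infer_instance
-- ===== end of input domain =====

-- B replaces A's single character loop (tracking count and running max together) by a frequency
-- map built once, the count as a sum of the five vowel frequencies, and the max priority by a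
-- scan of the vowels in descending priority order with an early break (objective: alternative).

-- ===== PORT A =====
-- `ch in vowels` for the single character ch is membership in the five letters;
-- `priority[ch]` is only evaluated under the vowel guard, where the key is present,
-- so the getD default 0 is never returned.
def vowel_info (word : String) : Int × Int :=
  let vowels : List Char := "aeiou".toList
  let priority : PySem.Dict Char Int :=
    PySem.Dict.ofList [('a', 5), ('e', 4), ('i', 3), ('o', 2), ('u', 1)]
  word.toList.foldl
    (fun (st : Int × Int) ch =>
      if vowels.contains ch then
        (st.1 + 1, if priority.getD ch 0 > st.2 then priority.getD ch 0 else st.2)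
      else st)
    (0, 0)

-- ===== PORT B =====
-- the `for v in priority: … break` loop of Source B
def pvBFindMax (freq : PySem.Dict Char Int) (prio : PySem.Dict Char Int) : List Char → Int
  | [] => 0
  | v :: vs => if freq.contains v then prio.getD v 0 else pvBFindMax freq prio vs

def vowel_info_alt (word : String) : Int × Int :=
  let priority : PySem.Dict Char Int :=
    PySem.Dict.ofList [('a', 5), ('e', 4), ('i', 3), ('o', 2), ('u', 1)]
  let freq : PySem.Dict Char Int :=
    word.toList.foldl (fun d ch => d.insert ch (d.getD ch 0 + 1)) PySem.Dict.empty
  let count : Int := (priority.keys.map (fun v => freq.getD v 0)).sum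
  (count, pvBFindMax freq priority priority.keys)

-- ===== PRECONDITION & SPEC =====
def Spec_vowel_info (word : String) (out : Int × Int) : Prop := out = vowel_info_alt word
instance (word : String) (out : Int × Int) : Decidable (Spec_vowel_info word out) := by unfold Spec_vowel_info; infer_instance

-- ===== CLAIM (what is proved, stated in full; the proofs are below) =====
def Claim_equal_vowel_info : Prop := ∀ (word : String), Dom_vowel_info word → Spec_vowel_info word (vowel_info word)

-- ===== LEMMAS AND PROOFS =====

-- priority of a character (0 for a non-vowel), and the running max of priorities of a char list
def pvP (ch : Char) : Int :=
  if ch = 'a' then 5 else if ch = 'e' then 4 else if ch = 'i' then 3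
  else if ch = 'o' then 2 else if ch = 'u' then 1 else 0

def pvGmax : List Char → Int
  | [] => 0
  | ch :: t => max (pvP ch) (pvGmax t)

theorem pvGetD_eq (ch : Char) :
    (PySem.Dict.ofList [('a', (5:Int)), ('e', 4), ('i', 3), ('o', 2), ('u', 1)]).getD ch 0 = pvP ch := by
  have h : PySem.Dict.ofList [('a', (5:Int)), ('e', 4), ('i', 3), ('o', 2), ('u', 1)]
      = PySem.Dict.mk [('a', (5:Int)), ('e', 4), ('i', 3), ('o', 2), ('u', 1)] := rfl
  rw [h, PySem.Dict.getD_eq_get?_getD]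
  simp [PySem.Dict.get?_mk_cons, pvP]
  split_ifs <;> first | rfl | simp_all [eq_comm]

theorem pvP_nonneg (ch : Char) : 0 ≤ pvP ch := by
  unfold pvP; split_ifs <;> norm_num

theorem pvP_le_five (ch : Char) : pvP ch ≤ 5 := by
  unfold pvP; split_ifs <;> norm_num

theorem pvP_le_four (ch : Char) (h : ch ≠ 'a') : pvP ch ≤ 4 := by
  unfold pvP; rw [if_neg h]; split_ifs <;> norm_num

theorem pvP_le_three (ch : Char) (ha : ch ≠ 'a') (he : ch ≠ 'e') : pvP ch ≤ 3 := by
  unfold pvP; rw [if_neg ha, if_neg he]; split_ifs <;> norm_num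

theorem pvP_le_two (ch : Char) (ha : ch ≠ 'a') (he : ch ≠ 'e') (hi : ch ≠ 'i') : pvP ch ≤ 2 := by
  unfold pvP; rw [if_neg ha, if_neg he, if_neg hi]; split_ifs <;> norm_num

theorem pvP_le_one (ch : Char) (ha : ch ≠ 'a') (he : ch ≠ 'e') (hi : ch ≠ 'i') (ho : ch ≠ 'o') :
    pvP ch ≤ 1 := by
  unfold pvP; rw [if_neg ha, if_neg he, if_neg hi, if_neg ho]; split_ifs <;> norm_num

theorem pvP_eq_zero (ch : Char) (ha : ch ≠ 'a') (he : ch ≠ 'e') (hi : ch ≠ 'i') (ho : ch ≠ 'o')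
    (hu : ch ≠ 'u') : pvP ch = 0 := by
  unfold pvP; rw [if_neg ha, if_neg he, if_neg hi, if_neg ho, if_neg hu]

theorem pvGmax_nonneg (t : List Char) : 0 ≤ pvGmax t := by
  induction t with
  | nil => simp [pvGmax]
  | cons ch t ih => simp only [pvGmax, le_max_iff]; right; exact ih

theorem pvGmax_le (t : List Char) (k : Int) (h0 : 0 ≤ k) (h : ∀ c ∈ t, pvP c ≤ k) :
    pvGmax t ≤ k := by
  induction t with
  | nil => simpa [pvGmax]
  | cons ch t ih =>
      simp only [pvGmax, max_le_iff]
      exact ⟨h ch (by simp), ih (fun c hc => h c (by simp [hc]))⟩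

theorem pvLe_gmax (c : Char) (t : List Char) (h : c ∈ t) : pvP c ≤ pvGmax t := by
  induction t with
  | nil => simp at h
  | cons ch t ih =>
      rcases List.mem_cons.mp h with h | h
      · subst h; simp [pvGmax]
      · simp only [pvGmax, le_max_iff]; right; exact ih h

-- interpretation of A's fold
theorem foldA_eq (cs : List Char) (c m : Int) (hm : 0 ≤ m) :
    cs.foldl
      (fun (st : Int × Int) ch =>
        if ("aeiou".toList).contains ch then
          (st.1 + 1,
            if (PySem.Dict.ofList [('a', (5:Int)), ('e', 4), ('i', 3), ('o', 2), ('u', 1)]).getD ch 0 > st.2 then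
              (PySem.Dict.ofList [('a', (5:Int)), ('e', 4), ('i', 3), ('o', 2), ('u', 1)]).getD ch 0
            else st.2)
        else st)
      (c, m)
    = (c + (cs.countP (fun ch => ("aeiou".toList).contains ch) : Int), max m (pvGmax cs)) := by
  induction cs generalizing c m with
  | nil => simp [pvGmax, max_eq_left hm]
  | cons ch t ih =>
      rw [List.foldl_cons]
      by_cases hv : ("aeiou".toList).contains ch
      · rw [if_pos hv, pvGetD_eq]
        have hm' : 0 ≤ (if pvP ch > m then pvP ch else m) := by
          split_ifs <;> [exact pvP_nonneg ch; exact hm]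
        rw [ih _ _ hm']
        refine Prod.ext ?_ ?_
        · simp only [List.countP_cons, hv, if_true]
          push_cast
          ring
        · simp only [pvGmax, max_def]
          split_ifs <;> omega
      · have hne : ch ≠ 'a' ∧ ch ≠ 'e' ∧ ch ≠ 'i' ∧ ch ≠ 'o' ∧ ch ≠ 'u' := by
          refine ⟨?_, ?_, ?_, ?_, ?_⟩ <;> rintro rfl <;> exact hv (by decide)
        have hp : pvP ch = 0 := pvP_eq_zero ch hne.1 hne.2.1 hne.2.2.1 hne.2.2.2.1 hne.2.2.2.2
        rw [if_neg hv]
        rw [ih _ _ hm]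
        simp [pvGmax, hp, max_eq_right (pvGmax_nonneg t),
          hne.1, hne.2.1, hne.2.2.1, hne.2.2.2.1, hne.2.2.2.2]

-- B's vowel count: the sum of the five vowel frequencies is the number of vowel characters
theorem pvCounts (cs : List Char) :
    cs.count 'a' + cs.count 'e' + cs.count 'i' + cs.count 'o' + cs.count 'u'
      = cs.countP (fun ch => ("aeiou".toList).contains ch) := by
  induction cs with
  | nil => simp
  | cons ch t ih =>
      have key : ((if ch == ('a':Char) then 1 else 0) + (if ch == ('e':Char) then 1 else 0)
          + (if ch == ('i':Char) then 1 else 0) + (if ch == ('o':Char) then 1 else 0)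
          + (if ch == ('u':Char) then 1 else 0) : ℕ)
          = (if ("aeiou".toList).contains ch then 1 else 0) := by
        by_cases ka : ch = 'a'
        · subst ka; decide
        by_cases ke : ch = 'e'
        · subst ke; decide
        by_cases ki : ch = 'i'
        · subst ki; decide
        by_cases ko : ch = 'o'
        · subst ko; decide
        by_cases ku : ch = 'u'
        · subst ku; decide
        have hc : ("aeiou".toList).contains ch = false := by
          simp [List.contains_eq_mem, show "aeiou".toList = ['a', 'e', 'i', 'o', 'u'] from by decide,
            ka, ke, ki, ko, ku]
        simp only [beq_iff_eq, hc]
        rw [if_neg ka, if_neg ke, if_neg ki, if_neg ko, if_neg ku]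
        simp
      simp only [List.count_cons, List.countP_cons, ← ih, ← key]
      omega

-- B's early-break scan over the vowels in priority order computes the max vowel priority
theorem pvChain_eq (cs : List Char) :
    (if cs.contains 'a' then (5:Int) else if cs.contains 'e' then 4 else if cs.contains 'i' then 3
      else if cs.contains 'o' then 2 else if cs.contains 'u' then 1 else 0) = pvGmax cs := by
  induction cs with
  | nil => simp [pvGmax]
  | cons ch t ih =>
      have hle5 := pvGmax_le t 5 (by norm_num) (fun c _ => pvP_le_five c)
      have hga : 'a' ∈ t → (5:Int) ≤ pvGmax t := fun h => pvLe_gmax 'a' t h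
      have hge : 'e' ∈ t → (4:Int) ≤ pvGmax t := fun h => pvLe_gmax 'e' t h
      have hgi : 'i' ∈ t → (3:Int) ≤ pvGmax t := fun h => pvLe_gmax 'i' t h
      have hgo : 'o' ∈ t → (2:Int) ≤ pvGmax t := fun h => pvLe_gmax 'o' t h
      have hla : 'a' ∉ t → pvGmax t ≤ 4 := fun h =>
        pvGmax_le t 4 (by norm_num) (fun c hc => pvP_le_four c (by rintro rfl; exact h hc))
      have hlae : 'a' ∉ t → 'e' ∉ t → pvGmax t ≤ 3 := fun h1 h2 =>
        pvGmax_le t 3 (by norm_num) (fun c hc => pvP_le_three c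
          (by rintro rfl; exact h1 hc) (by rintro rfl; exact h2 hc))
      have hlaei : 'a' ∉ t → 'e' ∉ t → 'i' ∉ t → pvGmax t ≤ 2 := fun h1 h2 h3 =>
        pvGmax_le t 2 (by norm_num) (fun c hc => pvP_le_two c
          (by rintro rfl; exact h1 hc) (by rintro rfl; exact h2 hc) (by rintro rfl; exact h3 hc))
      have hlaeio : 'a' ∉ t → 'e' ∉ t → 'i' ∉ t → 'o' ∉ t → pvGmax t ≤ 1 :=
        fun h1 h2 h3 h4 =>
        pvGmax_le t 1 (by norm_num) (fun c hc => pvP_le_one c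
          (by rintro rfl; exact h1 hc) (by rintro rfl; exact h2 hc) (by rintro rfl; exact h3 hc)
          (by rintro rfl; exact h4 hc))
      have hg0 := pvGmax_nonneg t
      simp only [pvGmax, List.contains_cons]
      by_cases ha : ch = 'a'
      · subst ha
        rw [show pvP 'a' = 5 from rfl, max_eq_left hle5]
        simp
      by_cases he : ch = 'e'
      · subst he
        rw [show pvP 'e' = 4 from rfl]
        by_cases hta : 'a' ∈ t
        · have hg : pvGmax t = 5 := le_antisymm hle5 (hga hta)
          rw [hg, show max (4:Int) 5 = 5 from by decide]
          simp [hta]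
        · rw [max_eq_left (hla hta)]
          simp [hta]
      by_cases hi : ch = 'i'
      · subst hi
        rw [show pvP 'i' = 3 from rfl]
        by_cases hta : 'a' ∈ t
        · have hg : pvGmax t = 5 := le_antisymm hle5 (hga hta)
          rw [hg, show max (3:Int) 5 = 5 from by decide]
          simp [hta]
        by_cases hte : 'e' ∈ t
        · have hg : pvGmax t = 4 := le_antisymm (hla hta) (hge hte)
          rw [hg, show max (3:Int) 4 = 4 from by decide]
          simp [hta, hte]
        · rw [max_eq_left (hlae hta hte)]
          simp [hta, hte]
      by_cases ho : ch = 'o'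
      · subst ho
        rw [show pvP 'o' = 2 from rfl]
        by_cases hta : 'a' ∈ t
        · have hg : pvGmax t = 5 := le_antisymm hle5 (hga hta)
          rw [hg, show max (2:Int) 5 = 5 from by decide]
          simp [hta]
        by_cases hte : 'e' ∈ t
        · have hg : pvGmax t = 4 := le_antisymm (hla hta) (hge hte)
          rw [hg, show max (2:Int) 4 = 4 from by decide]
          simp [hta, hte]
        by_cases hti : 'i' ∈ t
        · have hg : pvGmax t = 3 := le_antisymm (hlae hta hte) (hgi hti)
          rw [hg, show max (2:Int) 3 = 3 from by decide]
          simp [hta, hte, hti]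
        · rw [max_eq_left (hlaei hta hte hti)]
          simp [hta, hte, hti]
      by_cases hu : ch = 'u'
      · subst hu
        rw [show pvP 'u' = 1 from rfl]
        by_cases hta : 'a' ∈ t
        · have hg : pvGmax t = 5 := le_antisymm hle5 (hga hta)
          rw [hg, show max (1:Int) 5 = 5 from by decide]
          simp [hta]
        by_cases hte : 'e' ∈ t
        · have hg : pvGmax t = 4 := le_antisymm (hla hta) (hge hte)
          rw [hg, show max (1:Int) 4 = 4 from by decide]
          simp [hta, hte]
        by_cases hti : 'i' ∈ t
        · have hg : pvGmax t = 3 := le_antisymm (hlae hta hte) (hgi hti)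
          rw [hg, show max (1:Int) 3 = 3 from by decide]
          simp [hta, hte, hti]
        by_cases hto : 'o' ∈ t
        · have hg : pvGmax t = 2 := le_antisymm (hlaei hta hte hti) (hgo hto)
          rw [hg, show max (1:Int) 2 = 2 from by decide]
          simp [hta, hte, hti, hto]
        · rw [max_eq_left (hlaeio hta hte hti hto)]
          simp [hta, hte, hti, hto]
      · have hp : pvP ch = 0 := pvP_eq_zero ch ha he hi ho hu
        rw [hp, max_eq_right hg0, ← ih]
        simp [Ne.symm ha, Ne.symm he, Ne.symm hi, Ne.symm ho, Ne.symm hu]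

-- ===== VERDICT (by name: the statement is the Claim_ definition above) =====
theorem vowel_info_spec : Claim_equal_vowel_info := by
  intro word _
  unfold Spec_vowel_info vowel_info vowel_info_alt
  dsimp only
  rw [foldA_eq word.toList 0 0 le_rfl]
  rw [PySem.Dict.foldl_insert_getD_add_one_eq_counter]
  rw [show (PySem.Dict.ofList [('a', (5:Int)), ('e', 4), ('i', 3), ('o', 2), ('u', 1)]).keys
      = ['a', 'e', 'i', 'o', 'u'] from by decide]
  refine Prod.ext ?_ ?_
  · simp only [List.map_cons, List.map_nil, List.sum_cons, List.sum_nil, PySem.Dict.getD_counter]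
    rw [← pvCounts word.toList]
    push_cast
    ring
  · simp only [pvBFindMax, PySem.Dict.contains_counter]
    rw [show (PySem.Dict.ofList [('a', (5:Int)), ('e', 4), ('i', 3), ('o', 2), ('u', 1)]).getD 'a' 0
        = 5 from by decide,
      show (PySem.Dict.ofList [('a', (5:Int)), ('e', 4), ('i', 3), ('o', 2), ('u', 1)]).getD 'e' 0
        = 4 from by decide,
      show (PySem.Dict.ofList [('a', (5:Int)), ('e', 4), ('i', 3), ('o', 2), ('u', 1)]).getD 'i' 0
        = 3 from by decide,
      show (PySem.Dict.ofList [('a', (5:Int)), ('e', 4), ('i', 3), ('o', 2), ('u', 1)]).getD 'o' 0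
        = 2 from by decide,
      show (PySem.Dict.ofList [('a', (5:Int)), ('e', 4), ('i', 3), ('o', 2), ('u', 1)]).getD 'u' 0
        = 1 from by decide]
    rw [max_eq_right (pvGmax_nonneg word.toList), ← pvChain_eq word.toList]
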